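-- pv_equiv track=rewrite | github.com/dy-sh/spoty | spoty/utils.py | reorder_tag_keys_main_first
-- ===== SOURCE A (Python) =====
-- spoty_tags = \
--     [
--         'SPOTY_DUP_GROUP',
--         'SPOTY_DEF_DUP_TAGS',
--         'SPOTY_PROB_DUP_TAGS',
--         'SPOTY_DUP_LIST',
--         'SPOTY_DUP_ID',
--         'SPOTY_FOUND_BY',
--         'SPOTY_SOURCE',
--         'SPOTY_PLAYLIST_NAME',
--         'SPOTY_PLAYLIST_ID',
--         'SPOTY_PLAYLIST_INDEX',
--         'SPOTY_FILE_NAME',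
--         'SPOTY_TRACK_ID',
--         'SPOTY_TRACK_ADDED',
--         'SPOTY_LENGTH',
--     ]
--
-- spotify_tags = [
--     'SPOTIFY_TRACK_ID',
--     'SPOTIFY_ALBUM_ID',
-- ]
--
-- deezer_tags = [
--     'DEEZER_TRACK_ID',
--     'DEEZER_ALBUM_ID',
--     'DEEZER_ARTIST_ID',
--     'DEEZER_LYRICS_ID',
-- ]
--
-- main_tags = \
--     [
--         'ISRC',
--         'ARTIST',
--         'ALBUMARTIST',
--         'TITLE',
--         'ALBUM',
--         'GENRE',
--         'MOOD',
--         'OCCASION',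
--         'RATING',
--         'COMMENT'
--         'SOURCE'
--         'BPM',
--         'QUALITY',
--         'TEMPO',
--         'YEAR',
--     ]
--
-- def reorder_tag_keys_main_first(keys: list):
--     res = []
--
--     # reorder spoty tags first
--     for key in spoty_tags:
--         if key in keys:
--             res.append(key)
--
--     for key in spotify_tags:
--         if key in keys:
--             res.append(key)
--
--     for key in deezer_tags:
--         if key in keys:
--             res.append(key)
--
--     # reorder main tags first
--     for key in main_tags:
--         if key in keys:
--             res.append(key)
--
--     # add other tags
--     for key in keys:
--         if not key in res:
--             res.append(key)
--
--     return res
-- ===== SOURCE B (Python) =====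
-- spoty_tags = \
--     [
--         'SPOTY_DUP_GROUP',
--         'SPOTY_DEF_DUP_TAGS',
--         'SPOTY_PROB_DUP_TAGS',
--         'SPOTY_DUP_LIST',
--         'SPOTY_DUP_ID',
--         'SPOTY_FOUND_BY',
--         'SPOTY_SOURCE',
--         'SPOTY_PLAYLIST_NAME',
--         'SPOTY_PLAYLIST_ID',
--         'SPOTY_PLAYLIST_INDEX',
--         'SPOTY_FILE_NAME',
--         'SPOTY_TRACK_ID',
--         'SPOTY_TRACK_ADDED',
--         'SPOTY_LENGTH',
--     ]
--
-- spotify_tags = [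
--     'SPOTIFY_TRACK_ID',
--     'SPOTIFY_ALBUM_ID',
-- ]
--
-- deezer_tags = [
--     'DEEZER_TRACK_ID',
--     'DEEZER_ALBUM_ID',
--     'DEEZER_ARTIST_ID',
--     'DEEZER_LYRICS_ID',
-- ]
--
-- main_tags = \
--     [
--         'ISRC',
--         'ARTIST',
--         'ALBUMARTIST',
--         'TITLE',
--         'ALBUM',
--         'GENRE',
--         'MOOD',
--         'OCCASION',
--         'RATING',
--         'COMMENT'
--         'SOURCE'
--         'BPM',
--         'QUALITY',
--         'TEMPO',
--         'YEAR',
--     ]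
--
-- _PRIORITY = spoty_tags + spotify_tags + deezer_tags + main_tags
--
--
-- def reorder_tag_keys_main_first(keys: list):
--     # rank sort: dedup the input (first occurrences), then sort once by a
--     # total rank — position in the fixed priority list, or, for non-priority
--     # keys, len(_PRIORITY) + first-occurrence position (which keeps them after
--     # all priority tags, in input order).
--     uniq = list(dict.fromkeys(keys))
--     n = len(_PRIORITY)
--
--     def sort_key(k):
--         if k in _PRIORITY:
--             return _PRIORITY.index(k)
--         return n + uniq.index(k)
--
--     return sorted(uniq, key=sort_key)
-- ===== Notes on version B (the rewrite author's own statement) =====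
-- stated objective: alternative
-- what changed: Replaces A's five staged filter-and-append loops by dedup-then-sort: deduplicate the input keeping first occurrences, then a single sort by a total rank (index in the concatenated priority list, else len(priority)+first-occurrence index).
import Mathlib
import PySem

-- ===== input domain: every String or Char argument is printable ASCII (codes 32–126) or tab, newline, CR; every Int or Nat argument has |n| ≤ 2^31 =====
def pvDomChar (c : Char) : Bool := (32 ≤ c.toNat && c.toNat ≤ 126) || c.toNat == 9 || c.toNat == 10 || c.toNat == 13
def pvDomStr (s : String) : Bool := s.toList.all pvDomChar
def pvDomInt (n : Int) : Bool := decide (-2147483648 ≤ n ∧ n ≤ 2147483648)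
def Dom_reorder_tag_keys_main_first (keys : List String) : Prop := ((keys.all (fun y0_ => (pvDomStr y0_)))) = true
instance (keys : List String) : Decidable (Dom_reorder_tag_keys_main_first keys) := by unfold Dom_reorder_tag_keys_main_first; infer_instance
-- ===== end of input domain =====

-- B replaces A's five staged filter-and-append loops by dedup-then-sort: deduplicate the
-- input (first occurrences) and sort once by a total rank (priority index, else
-- len(priority)+first-occurrence index); same cost, different algorithm.

-- ===== PORT A =====
def spoty_tags : List String :=
  ["SPOTY_DUP_GROUP", "SPOTY_DEF_DUP_TAGS", "SPOTY_PROB_DUP_TAGS", "SPOTY_DUP_LIST",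
   "SPOTY_DUP_ID", "SPOTY_FOUND_BY", "SPOTY_SOURCE", "SPOTY_PLAYLIST_NAME",
   "SPOTY_PLAYLIST_ID", "SPOTY_PLAYLIST_INDEX", "SPOTY_FILE_NAME", "SPOTY_TRACK_ID",
   "SPOTY_TRACK_ADDED", "SPOTY_LENGTH"]

def spotify_tags : List String := ["SPOTIFY_TRACK_ID", "SPOTIFY_ALBUM_ID"]

def deezer_tags : List String :=
  ["DEEZER_TRACK_ID", "DEEZER_ALBUM_ID", "DEEZER_ARTIST_ID", "DEEZER_LYRICS_ID"]

-- 'COMMENT' 'SOURCE' 'BPM' in the Python source concatenates to one literal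
def main_tags : List String :=
  ["ISRC", "ARTIST", "ALBUMARTIST", "TITLE", "ALBUM", "GENRE", "MOOD", "OCCASION",
   "RATING", "COMMENTSOURCEBPM", "QUALITY", "TEMPO", "YEAR"]

def reorder_tag_keys_main_first (keys : List String) : List String :=
  let res : List String := []
  -- reorder spoty tags first
  let res := spoty_tags.foldl (fun res key => if key ∈ keys then res ++ [key] else res) res
  let res := spotify_tags.foldl (fun res key => if key ∈ keys then res ++ [key] else res) res
  let res := deezer_tags.foldl (fun res key => if key ∈ keys then res ++ [key] else res) res
  -- reorder main tags first
  let res := main_tags.foldl (fun res key => if key ∈ keys then res ++ [key] else res) res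
  -- add other tags
  keys.foldl (fun res key => if ¬ key ∈ res then res ++ [key] else res) res

-- ===== PORT B =====
def pvPriority : List String := spoty_tags ++ spotify_tags ++ deezer_tags ++ main_tags

-- Source B's inner 'sort_key(k)' closure over 'uniq'; '.index' is only reached on members,
-- so '(index? …).getD 0' is exact there
def pvSortKey (uniq : List String) (k : String) : Nat :=
  if k ∈ pvPriority then (PySem.List.index? pvPriority k).getD 0
  else pvPriority.length + (PySem.List.index? uniq k).getD 0

def reorder_tag_keys_main_first_alt (keys : List String) : List String :=
  let uniq := PySem.List.dedup keys       -- list(dict.fromkeys(keys))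
  PySem.List.sorted uniq (pvSortKey uniq)

-- ===== PRECONDITION & SPEC =====
def Spec_reorder_tag_keys_main_first (keys : List String) (out : List String) : Prop := out = reorder_tag_keys_main_first_alt keys
instance (keys : List String) (out : List String) : Decidable (Spec_reorder_tag_keys_main_first keys out) := by unfold Spec_reorder_tag_keys_main_first; infer_instance

-- ===== CLAIM (what is proved, stated in full; the proofs are below) =====
def Claim_equal_reorder_tag_keys_main_first : Prop := ∀ (keys : List String), Dom_reorder_tag_keys_main_first keys → Spec_reorder_tag_keys_main_first keys (reorder_tag_keys_main_first keys)

-- ===== LEMMAS AND PROOFS =====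

-- the "other tags" appended by A's last loop: first occurrences in ks that are
-- neither priority tags nor in the already-seen set
def pvOthers (ks : List String) (seen : List String) : List String :=
  match ks with
  | [] => []
  | k :: t =>
      if k ∈ seen then pvOthers t seen
      else if k ∈ pvPriority then pvOthers t (seen ++ [k])
      else k :: pvOthers t (seen ++ [k])

-- first occurrences of ks outside seen, in order (dedup with an accumulator)
def pvFresh (ks : List String) (seen : List String) : List String :=
  match ks with
  | [] => []
  | k :: t => if k ∈ seen then pvFresh t seen else k :: pvFresh t (seen ++ [k])

-- A's last loop, given that res already contains exactly the priority-or-seen keys of ks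
theorem pvA_loop (ks : List String) (res seen : List String)
    (H : ∀ k ∈ ks, k ∈ res ↔ (k ∈ pvPriority ∨ k ∈ seen)) :
    ks.foldl (fun res key => if ¬ key ∈ res then res ++ [key] else res) res
      = res ++ pvOthers ks seen := by
  induction ks generalizing res seen with
  | nil => simp [pvOthers]
  | cons k t ih =>
    have hk := H k (by simp)
    by_cases hs : k ∈ seen
    · have hr : k ∈ res := hk.mpr (Or.inr hs)
      simp only [List.foldl_cons, pvOthers, if_pos hs]
      rw [if_neg (not_not_intro hr)]
      exact ih res seen (fun k' hk' => H k' (by simp [hk']))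
    · by_cases hp : k ∈ pvPriority
      · have hr : k ∈ res := hk.mpr (Or.inl hp)
        simp only [List.foldl_cons, pvOthers, if_neg hs, if_pos hp]
        rw [if_neg (not_not_intro hr)]
        refine ih res (seen ++ [k]) (fun k' hk' => ?_)
        rw [H k' (by simp [hk'])]
        simp only [List.mem_append, List.mem_singleton]
        constructor
        · tauto
        · rintro (h | h | rfl)
          · exact Or.inl h
          · exact Or.inr h
          · exact Or.inl hp
      · have hr : k ∉ res := fun h => by rcases hk.mp h with h' | h' <;> contradiction
        simp only [List.foldl_cons, pvOthers, if_neg hs, if_neg hp]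
        rw [if_pos hr]
        rw [ih (res ++ [k]) (seen ++ [k]) (fun k' hk' => by
          simp only [List.mem_append, List.mem_singleton]
          rw [show (k' ∈ res ↔ k' ∈ pvPriority ∨ k' ∈ seen) from H k' (by simp [hk'])]
          tauto)]
        simp

-- PySem dedup (dict.fromkeys) with an explicit accumulator
theorem pvDedup_acc (ks acc : List String) :
    ks.foldl PySem.Set.add acc = acc ++ pvFresh ks acc := by
  induction ks generalizing acc with
  | nil => simp [pvFresh]
  | cons k t ih =>
    by_cases hs : k ∈ acc
    · have : PySem.Set.add acc k = acc := by
        simp [PySem.Set.add, PySem.Set.contains, hs]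
      simp only [List.foldl_cons, this, pvFresh, if_pos hs]
      exact ih acc
    · have : PySem.Set.add acc k = acc ++ [k] := by
        simp [PySem.Set.add, PySem.Set.contains, hs]
      simp only [List.foldl_cons, this, pvFresh, if_neg hs]
      rw [ih (acc ++ [k])]
      simp

theorem pvDedup_eq_fresh (ks : List String) :
    PySem.List.dedup ks = pvFresh ks [] := by
  have := pvDedup_acc ks []
  simpa [PySem.List.dedup, PySem.Set.ofList, PySem.Set.empty] using this

-- A's "others" are exactly the non-priority entries of the deduped input
theorem pvOthers_eq_filter (ks seen : List String) :
    pvOthers ks seen = (pvFresh ks seen).filter (fun k => !decide (k ∈ pvPriority)) := by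
  induction ks generalizing seen with
  | nil => simp [pvOthers, pvFresh]
  | cons k t ih =>
    by_cases hs : k ∈ seen
    · simp only [pvOthers, pvFresh, if_pos hs]; exact ih seen
    · by_cases hp : k ∈ pvPriority
      · simp only [pvOthers, pvFresh, if_neg hs, if_pos hp, List.filter_cons,
          decide_eq_true hp, Bool.not_true]
        simpa using ih (seen ++ [k])
      · simp only [pvOthers, pvFresh, if_neg hs, List.filter_cons, hp]
        simpa using ih (seen ++ [k])

-- rank facts for .index on a duplicate-free list
theorem pvRk_getElem (l : List String) (h : l.Nodup) (i : Nat) (hi : i < l.length) :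
    (PySem.List.index? l l[i]).getD 0 = i := by
  rw [PySem.List.index?_eq_idxOf?]
  have : List.idxOf? l[i] l = some i := by
    rw [List.idxOf?_eq_some_iff]
    refine ⟨hi, rfl, fun j hj he => ?_⟩
    have := (List.Nodup.getElem_inj_iff h).mp he
    omega
  simp [this]

theorem pvRk_pairwise (l : List String) (h : l.Nodup) :
    l.Pairwise (fun a b => (PySem.List.index? l a).getD 0 < (PySem.List.index? l b).getD 0) := by
  rw [List.pairwise_iff_getElem]
  intro i j hi hj hij
  rw [pvRk_getElem l h i hi, pvRk_getElem l h j hj]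
  exact hij

theorem pvRk_lt_length (l : List String) (a : String) (ha : a ∈ l) :
    (PySem.List.index? l a).getD 0 < l.length := by
  have hs : (PySem.List.index? l a).isSome := (PySem.List.index?_isSome_iff l a).mpr ha
  obtain ⟨k, hk⟩ := Option.isSome_iff_exists.mp hs
  obtain ⟨hlt, -, -⟩ := PySem.List.getElem_of_index?_eq_some hk
  rw [hk]
  simpa using hlt

theorem pvPriority_nodup : pvPriority.Nodup := by decide

-- B's sort produces: priority tags present (priority order) ++ non-priority dedup
theorem pvB_sorted (keys : List String) :
    PySem.List.sorted (PySem.List.dedup keys) (pvSortKey (PySem.List.dedup keys))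
      = pvPriority.filter (fun p => decide (p ∈ keys))
        ++ (PySem.List.dedup keys).filter (fun k => !decide (k ∈ pvPriority)) := by
  set uniq := PySem.List.dedup keys with huniq
  have hnu : uniq.Nodup := PySem.List.nodup_dedup keys
  have hmemu : ∀ x, x ∈ uniq ↔ x ∈ keys := fun x => PySem.List.mem_dedup keys x
  set priF := pvPriority.filter (fun p => decide (p ∈ keys)) with hpriF
  set othF := uniq.filter (fun k => !decide (k ∈ pvPriority)) with hothF
  apply PySem.List.sorted_eq_of_perm_of_pairwise_lt
  · -- (priF ++ othF).Perm uniq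
    have h1 : priF.Perm (uniq.filter (fun k => decide (k ∈ pvPriority))) := by
      rw [List.perm_ext_iff_of_nodup (pvPriority_nodup.filter _) (hnu.filter _)]
      intro a
      simp only [List.mem_filter, decide_eq_true_eq, hmemu]
      tauto
    exact (h1.append_right othF).trans (List.filter_append_perm _ uniq)
  · -- strictly increasing ranks along priF ++ othF
    rw [List.pairwise_append]
    refine ⟨?_, ?_, ?_⟩
    · refine ((pvRk_pairwise pvPriority pvPriority_nodup).sublist
        List.filter_sublist).imp_of_mem ?_
      intro a b ha hb hab
      have hap : a ∈ pvPriority := (List.mem_filter.mp ha).1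
      have hbp : b ∈ pvPriority := (List.mem_filter.mp hb).1
      simpa [pvSortKey, hap, hbp] using hab
    · refine ((pvRk_pairwise uniq hnu).sublist List.filter_sublist).imp_of_mem ?_
      intro a b ha hb hab
      have hap : a ∉ pvPriority := by
        have := (List.mem_filter.mp ha).2; simpa using this
      have hbp : b ∉ pvPriority := by
        have := (List.mem_filter.mp hb).2; simpa using this
      simpa [pvSortKey, hap, hbp] using hab
    · intro a ha b hb
      have hap : a ∈ pvPriority := (List.mem_filter.mp ha).1
      have hbp : b ∉ pvPriority := by
        have := (List.mem_filter.mp hb).2; simpa using this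
      have h1 : (PySem.List.index? pvPriority a).getD 0 < pvPriority.length :=
        pvRk_lt_length pvPriority a hap
      simp only [pvSortKey, if_pos hap, if_neg hbp]
      omega

-- ===== VERDICT (by name: the statement is the Claim_ definition above) =====
theorem reorder_tag_keys_main_first_spec : Claim_equal_reorder_tag_keys_main_first := by
  intro keys _
  unfold Spec_reorder_tag_keys_main_first reorder_tag_keys_main_first reorder_tag_keys_main_first_alt
  dsimp only
  rw [PySem.List.foldl_append_ite_eq_filter, PySem.List.foldl_append_ite_eq_filter,
      PySem.List.foldl_append_ite_eq_filter, PySem.List.foldl_append_ite_eq_filter]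
  rw [pvA_loop keys _ [] (fun k hk => by
        simp only [pvPriority, List.nil_append, List.mem_filter, List.mem_append,
          List.not_mem_nil, or_false, decide_eq_true_eq]
        tauto)]
  rw [pvB_sorted keys]
  rw [pvOthers_eq_filter, ← pvDedup_eq_fresh]
  simp [pvPriority, List.filter_append]
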